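-- pv_equiv track=rewrite | github.com/zhong-lab/code | spyre/spyre/widgets/task.py | readable_seconds
-- ===== SOURCE A (Python) =====
-- def readable_seconds(seconds):
--     seconds = int(seconds)
--     if not seconds:
--         return '0 s'
--     hours = seconds // 3600
--     mins = (seconds % 3600) // 60
--     secs = seconds % 60
--     htext = '{} h'.format(hours) if hours else ''
--     mtext = '{} m'.format(mins) if mins else ''
--     stext = '{} s'.format(secs) if secs else ''
--     readable = ' '.join(v for v in (htext, mtext, stext) if v)
--     return readable
-- ===== SOURCE B (Python) =====
-- def _parts(n, units):
--     if not n: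
--         return []
--     if len(units) == 1:
--         head, r = [], n
--     else:
--         head, r = _parts(n // 60, units[1:]), n % 60
--     return head + (['{} {}'.format(r, units[0])] if r else [])
--
-- def readable_seconds(seconds):
--     seconds = int(seconds)
--     if not seconds:
--         return '0 s'
--     return ' '.join(_parts(seconds, ['s', 'm', 'h']))
-- ===== Notes on version B (the rewrite author's own statement) =====
-- stated objective: alternative
-- what changed: Replaces A's three direct quotient/remainder computations into hours, minutes and seconds with a recursive helper that peels units from the smallest upward by repeated divmod over a unit-label list, building the parts list back-to-front.
import Mathlib
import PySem

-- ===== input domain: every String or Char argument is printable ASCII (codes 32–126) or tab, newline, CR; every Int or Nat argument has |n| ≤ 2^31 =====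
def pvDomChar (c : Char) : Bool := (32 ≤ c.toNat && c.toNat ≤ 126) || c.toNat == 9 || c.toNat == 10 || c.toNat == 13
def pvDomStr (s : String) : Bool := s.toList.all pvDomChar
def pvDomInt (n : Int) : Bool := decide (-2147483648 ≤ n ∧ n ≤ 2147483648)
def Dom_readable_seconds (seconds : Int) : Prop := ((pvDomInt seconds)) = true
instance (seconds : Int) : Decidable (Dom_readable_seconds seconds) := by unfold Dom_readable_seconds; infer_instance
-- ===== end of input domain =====

-- B replaces A's direct //3600, %3600//60, %60 computations with a recursive helper that
-- peels units from the smallest upward via repeated divmod-by-60 (alternative decomposition, same cost).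

-- ===== PORT A =====
def readable_seconds (seconds : Int) : String :=
  if seconds = 0 then "0 s" else
  let hours := PySem.Int.floordiv seconds 3600
  let mins := PySem.Int.floordiv (PySem.Int.mod seconds 3600) 60
  let secs := PySem.Int.mod seconds 60
  let htext : List Char := if hours ≠ 0 then PySem.Int.toChars hours ++ [' ', 'h'] else []
  let mtext : List Char := if mins ≠ 0 then PySem.Int.toChars mins ++ [' ', 'm'] else []
  let stext : List Char := if secs ≠ 0 then PySem.Int.toChars secs ++ [' ', 's'] else []
  String.ofList (PySem.Chars.join [' '] (([htext, mtext, stext]).filter (· ≠ [])))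

-- ===== PORT B =====
-- port of Source B's _parts; the [] case is unreachable (always called with a nonempty unit list)
def pvParts : Int → List Char → List (List Char)
  | _, [] => []
  | n, u :: rest =>
    if n = 0 then [] else
    let hr : List (List Char) × Int :=
      if rest.isEmpty then ([], n)
      else (pvParts (PySem.Int.floordiv n 60) rest, PySem.Int.mod n 60)
    hr.1 ++ (if hr.2 ≠ 0 then [PySem.Int.toChars hr.2 ++ [' ', u]] else [])

def readable_seconds_alt (seconds : Int) : String :=
  if seconds = 0 then "0 s"
  else String.ofList (PySem.Chars.join [' '] (pvParts seconds ['s', 'm', 'h']))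

-- ===== PRECONDITION & SPEC =====
def Spec_readable_seconds (seconds : Int) (out : String) : Prop := out = readable_seconds_alt seconds
instance (seconds : Int) (out : String) : Decidable (Spec_readable_seconds seconds out) := by unfold Spec_readable_seconds; infer_instance

-- ===== CLAIM (what is proved, stated in full; the proofs are below) =====
def Claim_equal_readable_seconds : Prop := ∀ (seconds : Int), Dom_readable_seconds seconds → Spec_readable_seconds seconds (readable_seconds seconds)

-- ===== LEMMAS AND PROOFS =====

-- ===== VERDICT (by name: the statement is the Claim_ definition above) =====
theorem readable_seconds_spec : Claim_equal_readable_seconds := by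
  intro s _
  unfold Spec_readable_seconds readable_seconds readable_seconds_alt
  by_cases hz : s = 0
  · simp [hz]
  · have e1 : s / 60 / 60 = s / 3600 := by omega
    have e2 : s / 60 % 60 = s % 3600 / 60 := by omega
    have e3 : s / 60 = 0 ↔ (s / 3600 = 0 ∧ s % 3600 / 60 = 0) := by omega
    have e4 : ((60:Int) ∣ s / 60) ↔ s % 3600 / 60 = 0 := by omega
    have e5 : ((60:Int) ∣ s) ↔ s % 60 = 0 := by omega
    by_cases h1 : s / 3600 = 0 <;> by_cases h2 : s % 3600 / 60 = 0 <;> by_cases h3 : s % 60 = 0 <;>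
      simp [pvParts, hz, e1, e2, e3, h1, h2, h3]
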